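-- pv_equiv track=rewrite | github.com/sodlfmag/Baekjoon_Hub | 프로그래머스/lv1/17681. ［1차］ 비밀지도/［1차］ 비밀지도.py | solution
-- ===== SOURCE A (Python) =====
-- def solution(n, arr1, arr2):
--     temp1 = []
--     temp2 = []
--     graph = []
--     for i in range(n):
--         temp = list(map(int, bin(arr1[i])[2:].zfill(n)))
--         temp1.append(temp)
--
--     for i in range(n):
--         temp = list(map(int,bin(arr2[i])[2:].zfill(n)))
--         temp2.append(temp)
--
--     for i in range(n):
--         graph.append([])
--         for j in range(n):
--             if(temp1[i][j] or temp2[i][j]):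
--                 graph[i].append('#')
--             else:
--                 graph[i].append(' ')
--
--     for i in range(n):
--         temp = ''.join(graph[i])
--         graph[i] = temp
--
--     return graph
-- ===== SOURCE B (Python) =====
-- def solution(n, arr1, arr2):
--     tr = str.maketrans('01', ' #')
--     return [bin(arr1[i] | arr2[i])[2:].zfill(n).translate(tr) for i in range(n)]
-- ===== Notes on version B (the rewrite author's own statement) =====
-- stated objective: simpler
-- what changed: Instead of building two n x n integer bit-matrices and OR-ing them cell by cell in nested loops, B ORs the two row integers once and renders one binary string per row via translate; Pre_ restricts to the problem's stated domain of row values 0 <= x < 2^n, outside which A's fixed-width cell loop silently keeps only each over-wide row's top n bits while B's single string keeps all bits - an unspecified corner where neither width is the specified one.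
-- outside the precondition, e.g. on solution(1, [2], [0]): A returns ['#'], B returns ['# ']
import Mathlib
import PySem

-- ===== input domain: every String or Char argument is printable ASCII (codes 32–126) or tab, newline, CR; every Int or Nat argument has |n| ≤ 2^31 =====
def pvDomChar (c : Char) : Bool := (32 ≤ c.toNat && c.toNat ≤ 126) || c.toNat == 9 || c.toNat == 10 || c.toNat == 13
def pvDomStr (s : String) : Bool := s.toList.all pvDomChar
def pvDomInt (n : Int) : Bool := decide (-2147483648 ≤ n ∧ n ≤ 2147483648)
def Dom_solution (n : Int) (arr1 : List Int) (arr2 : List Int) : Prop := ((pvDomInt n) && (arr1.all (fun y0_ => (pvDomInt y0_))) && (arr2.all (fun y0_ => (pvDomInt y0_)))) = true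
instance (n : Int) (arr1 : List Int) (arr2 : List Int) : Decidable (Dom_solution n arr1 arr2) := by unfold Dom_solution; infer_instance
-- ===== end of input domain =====

-- B replaces A's two intermediate bit-matrices and the nested per-cell loop by, per row,
-- one integer OR plus a single string transform (objective: simpler).


-- ===== PORT A =====
-- Ports of the builtins the Pythons call:
-- bitsChars a L = the L low bits of a, MSB first, as '0'/'1' chars
def bitsChars (a L : Nat) : List Char :=
  (List.range L).map (fun j => if a.testBit (L - 1 - j) then '1' else '0')

-- bin(a)[2:] for a ≥ 0: Nat.size is the bit length, so this is Python's digit string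
def pyBin (a : Nat) : List Char := bitsChars a (max 1 a.size)

-- s.zfill(n)
def zfill (s : List Char) (n : Nat) : List Char :=
  List.replicate (n - s.length) '0' ++ s

-- int(c) for a single char (exact on the '0'/'1' digit chars produced here)
def digitInt (c : Char) : Int := (c.toNat : Int) - 48

def solution (n : Int) (arr1 : List Int) (arr2 : List Int) : List String :=
  -- for i in range(n): temp1.append(list(map(int, bin(arr1[i])[2:].zfill(n))))
  -- (.toNat is exact here: on negatives Python's bin(x)[2:] feeds 'b…' to int(),
  -- a ValueError, excluded by Pre_; pyGetD's default is never used inside Pre_)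
  let temp1 := (PySem.List.pyRange 0 n 1).map
    (fun i => (zfill (pyBin (PySem.List.pyGetD arr1 i 0).toNat) n.toNat).map digitInt)
  let temp2 := (PySem.List.pyRange 0 n 1).map
    (fun i => (zfill (pyBin (PySem.List.pyGetD arr2 i 0).toNat) n.toNat).map digitInt)
  -- nested loop: '#' if temp1[i][j] or temp2[i][j] (int truthiness) else ' '
  let graph := (PySem.List.pyRange 0 n 1).map
    (fun i => (PySem.List.pyRange 0 n 1).map
      (fun j =>
        if PySem.List.pyGetD (PySem.List.pyGetD temp1 i []) j 0 ≠ 0 ∨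
           PySem.List.pyGetD (PySem.List.pyGetD temp2 i []) j 0 ≠ 0
        then '#' else ' '))
  -- final loop: graph[i] = ''.join(graph[i])
  graph.map (fun row => String.ofList row)

-- ===== PORT B =====
def solution_alt (n : Int) (arr1 : List Int) (arr2 : List Int) : List String :=
  -- [bin(arr1[i] | arr2[i])[2:].zfill(n).translate(tr) for i in range(n)]
  -- ('|'' ported on .toNat: exact for the nonnegative entries Pre_ admits)
  (PySem.List.pyRange 0 n 1).map (fun i =>
    let v := (PySem.List.pyGetD arr1 i 0).toNat ||| (PySem.List.pyGetD arr2 i 0).toNat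
    String.ofList ((zfill (pyBin v) n.toNat).map
      (fun c => if c = '1' then '#' else if c = '0' then ' ' else c)))

-- ===== PRECONDITION & SPEC =====
-- Pre_ = the problem's stated domain: rows 0..n-1 exist in both lists (else A raises
-- IndexError) and each used value satisfies 0 ≤ x (bin(-x)[2:] feeds 'b…' to int():
-- ValueError) and x < 2^n — the map's specified width; for wider values A's fixed-width
-- cell loop keeps only each row's top n bits while B's string keeps all bits: an
-- unspecified corner where neither width is the intended one, so it is excluded.
def Pre_solution (n : Int) (arr1 : List Int) (arr2 : List Int) : Prop :=
  n ≤ (arr1.length : Int) ∧ n ≤ (arr2.length : Int) ∧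
  (∀ x ∈ arr1.take n.toNat, 0 ≤ x ∧ x < 2 ^ n.toNat) ∧
  (∀ x ∈ arr2.take n.toNat, 0 ≤ x ∧ x < 2 ^ n.toNat)
instance (n : Int) (arr1 : List Int) (arr2 : List Int) : Decidable (Pre_solution n arr1 arr2) := by
  unfold Pre_solution; infer_instance

def pvWitness_solution : Int × List Int × List Int := (2, ([1, 2] : List Int), ([2, 1] : List Int))

def Spec_solution (n : Int) (arr1 : List Int) (arr2 : List Int) (out : List String) : Prop := out = solution_alt n arr1 arr2
instance (n : Int) (arr1 : List Int) (arr2 : List Int) (out : List String) : Decidable (Spec_solution n arr1 arr2 out) := by unfold Spec_solution; infer_instance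

-- ===== CLAIM (what is proved, stated in full; the proofs are below) =====
def Claim_equal_solution : Prop := ∀ (n : Int) (arr1 : List Int) (arr2 : List Int), Dom_solution n arr1 arr2 → Pre_solution n arr1 arr2 → Spec_solution n arr1 arr2 (solution n arr1 arr2)

-- ===== LEMMAS AND PROOFS =====

lemma length_bitsChars (a L : Nat) : (bitsChars a L).length = L := by
  simp [bitsChars]

-- zero-padding a binary string on the left is extending the bit window
lemma pad_bits (a L M : Nat) (hL : a.size ≤ L) (hLM : L ≤ M) :
    List.replicate (M - L) '0' ++ bitsChars a L = bitsChars a M := by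
  apply List.ext_getElem
  · simp [bitsChars]; omega
  intro i h1 h2
  have h2' : i < M := by simpa [bitsChars] using h2
  have hlen : (List.replicate (M - L) '0' : List Char).length = M - L := by simp
  by_cases hi : i < M - L
  · rw [List.getElem_append_left (by simpa using hi)]
    have hbit : a.testBit (M - 1 - i) = false := by
      apply Nat.testBit_lt_two_pow
      calc a < 2 ^ a.size := Nat.lt_size_self a
        _ ≤ 2 ^ (M - 1 - i) := Nat.pow_le_pow_right (by norm_num) (by omega)
    simp [bitsChars, hbit]
  · rw [List.getElem_append_right (by simp; omega)]
    simp only [bitsChars, List.getElem_map, List.getElem_range, List.length_replicate]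
    have hidx : L - 1 - (i - (M - L)) = M - 1 - i := by omega
    rw [hidx]

-- bin(a)[2:].zfill(N) is the max(N, len(bin(a)[2:]))-bit window of a
lemma zfill_pyBin (a N : Nat) :
    zfill (pyBin a) N = bitsChars a (max N (max 1 a.size)) := by
  have h := pad_bits a (max 1 a.size) (max N (max 1 a.size))
    (le_trans (Nat.le_max_right 1 a.size) (le_refl _)) (Nat.le_max_right _ _)
  rw [zfill, pyBin, length_bitsChars]
  rw [show N - max 1 a.size = max N (max 1 a.size) - max 1 a.size by omega]
  exact h

lemma digit_getD (a L j : Nat) (hj : j < L) :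
    ((bitsChars a L).map digitInt).getD j 0 = if a.testBit (L - 1 - j) then 1 else 0 := by
  have hlen : ((bitsChars a L).map digitInt).length = L := by simp [bitsChars]
  rw [List.getD_eq_getElem _ _ (by omega)]
  simp only [bitsChars, List.getElem_map, List.getElem_range, digitInt]
  split_ifs <;> rfl

lemma getElem_bitsChars (a L j : Nat) (h : j < (bitsChars a L).length) :
    (bitsChars a L)[j] = if a.testBit (L - 1 - j) then '1' else '0' := by
  simp [bitsChars]

-- one row: A's per-cell OR of the two n-wide digit rows = B's rendering of the
-- integer OR, for in-range row values
lemma row_eq (N a b : Nat) (hN : 1 ≤ N) (ha : a < 2 ^ N) (hb : b < 2 ^ N) :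
    (List.range N).map (fun j =>
      if ((zfill (pyBin a) N).map digitInt).getD j 0 ≠ 0 ∨
         ((zfill (pyBin b) N).map digitInt).getD j 0 ≠ 0
      then '#' else ' ')
    = (zfill (pyBin (a ||| b)) N).map
        (fun c => if c = '1' then '#' else if c = '0' then ' ' else c) := by
  have hsa : a.size ≤ N := Nat.size_le.mpr ha
  have hsb : b.size ≤ N := Nat.size_le.mpr hb
  have hsv : (a ||| b).size ≤ N := Nat.size_le.mpr (Nat.or_lt_two_pow ha hb)
  have hma : max N (max 1 a.size) = N := by omega
  have hmb : max N (max 1 b.size) = N := by omega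
  have hmv : max N (max 1 (a ||| b).size) = N := by omega
  rw [zfill_pyBin (a ||| b) N, hmv, zfill_pyBin a N, hma, zfill_pyBin b N, hmb]
  apply List.ext_getElem
  · simp [bitsChars]
  intro j hj1 hj2
  have hj : j < N := by simpa using hj1
  rw [List.getElem_map, List.getElem_range, List.getElem_map,
    getElem_bitsChars _ _ j (by simpa [length_bitsChars] using hj),
    digit_getD a _ j (by omega), digit_getD b _ j (by omega)]
  rw [Nat.testBit_or]
  cases a.testBit (N - 1 - j) <;> cases b.testBit (N - 1 - j) <;> simp

set_option maxHeartbeats 1000000 in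
theorem main_eq (n : Int) (arr1 : List Int) (arr2 : List Int)
    (hl1 : n ≤ (arr1.length : Int)) (hl2 : n ≤ (arr2.length : Int))
    (h1 : ∀ x ∈ arr1.take n.toNat, 0 ≤ x ∧ x < 2 ^ n.toNat)
    (h2 : ∀ x ∈ arr2.take n.toNat, 0 ≤ x ∧ x < 2 ^ n.toNat) :
    solution n arr1 arr2 = solution_alt n arr1 arr2 := by
  unfold solution solution_alt
  simp only [PySem.List.pyRange_zero, List.map_map]
  apply List.map_congr_left
  intro k hk
  simp only [List.mem_range] at hk
  simp only [Function.comp_apply, PySem.List.pyGetD_natCast]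
  have hget : ∀ {α : Type} (f : Int → α) (d : α),
      (List.map (f ∘ fun k : Nat => (↑k : Int)) (List.range n.toNat)).getD k d = f ↑k := by
    intro α f d
    rw [List.getD_eq_getElem _ _ (by simpa using hk)]
    simp
  rw [hget, hget]
  have hbound : ∀ (xs : List Int), n ≤ (xs.length : Int) →
      (∀ x ∈ xs.take n.toNat, 0 ≤ x ∧ x < 2 ^ n.toNat) →
      (xs.getD k 0).toNat < 2 ^ n.toNat := by
    intro xs hl hx
    have hkl : k < xs.length := by omega
    have hmem : xs[k] ∈ xs.take n.toNat := by
      have : (xs.take n.toNat)[k]'(by simp; omega) = xs[k] := List.getElem_take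
      rw [← this]; exact List.getElem_mem _
    have hv := hx _ hmem
    rw [List.getD_eq_getElem _ _ hkl]
    have hcast : ((xs[k].toNat : Int)) = xs[k] := Int.toNat_of_nonneg hv.1
    have : ((xs[k].toNat : Int)) < ((2 ^ n.toNat : Nat) : Int) := by
      rw [hcast]; exact_mod_cast hv.2
    exact_mod_cast this
  congr 1
  rw [← row_eq n.toNat ((arr1.getD k 0).toNat) ((arr2.getD k 0).toNat) (by omega)
    (hbound arr1 hl1 h1) (hbound arr2 hl2 h2)]
  apply List.map_congr_left
  intro j hj
  simp only [Function.comp_apply, PySem.List.pyGetD_natCast]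

-- ===== VERDICT (by name: the statement is the Claim_ definition above) =====
theorem solution_spec : Claim_equal_solution := by
  intro n arr1 arr2 _ hpre
  exact main_eq n arr1 arr2 hpre.1 hpre.2.1 hpre.2.2.1 hpre.2.2.2
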